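-- pv_equiv track=rewrite | github.com/SauravSinha76/scaler2 | class68/seats.py | solve
-- ===== SOURCE A (Python) =====
-- def solve(A):
--     n = len(A)
--     seat=[]
--     for i in range(n):
--         if A[i] == 'x':
--             seat.append(i)
--
--
--     mid = len(seat) // 2
--
--     l = mid -1
--     r = mid +1
--     k = 1
--     res = 0
--
--     while l > -1:
--         res += (seat[mid] - seat[l] - k)
--         l -= 1
--         k += 1
--
--     k = 1
--     while r < len(seat):
--         res += (seat[r] - seat[mid] - k)
--         r += 1
--         k += 1
--
--     return res
-- ===== SOURCE B (Python) =====
-- def solve(A):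
--     seat = [i for i, ch in enumerate(A) if ch == 'x']
--     m = len(seat)
--     return sum((seat[j + 1] - seat[j] - 1) * min(j + 1, m - 1 - j)
--                for j in range(m - 1))
-- ===== Notes on version B (the rewrite author's own statement) =====
-- stated objective: alternative
-- what changed: Instead of walking outward from a median pivot accumulating distances, B sums over consecutive seat pairs the empty gap between them weighted by min(j+1, m-1-j) (how many people must cross that gap), with no median or pivot at all.
import Mathlib
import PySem

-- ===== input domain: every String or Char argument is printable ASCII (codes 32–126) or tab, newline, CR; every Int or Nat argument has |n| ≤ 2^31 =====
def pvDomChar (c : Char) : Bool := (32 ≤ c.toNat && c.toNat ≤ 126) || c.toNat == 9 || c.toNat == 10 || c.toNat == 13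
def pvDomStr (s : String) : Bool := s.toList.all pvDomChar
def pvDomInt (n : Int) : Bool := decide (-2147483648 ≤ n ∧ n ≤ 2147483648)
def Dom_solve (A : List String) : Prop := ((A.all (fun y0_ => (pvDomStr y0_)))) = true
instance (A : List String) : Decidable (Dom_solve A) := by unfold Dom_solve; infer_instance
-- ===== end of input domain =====

-- B replaces A's outward walks from a median pivot by a pivot-free pass over consecutive
-- seat pairs, summing each empty gap weighted by min(j+1, m-1-j): a different algorithm.

-- ===== PORT A =====
def solveLoopL (seat : List Int) (mid l k res : Int) : Int :=
  if l > -1 then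
    solveLoopL seat mid (l - 1) (k + 1)
      (res + (PySem.List.pyGetD seat mid 0 - PySem.List.pyGetD seat l 0 - k))
  else res
termination_by (l + 1).toNat
decreasing_by omega

def solveLoopR (seat : List Int) (mid r k res : Int) : Int :=
  if r < (seat.length : Int) then
    solveLoopR seat mid (r + 1) (k + 1)
      (res + (PySem.List.pyGetD seat r 0 - PySem.List.pyGetD seat mid 0 - k))
  else res
termination_by ((seat.length : Int) - r).toNat
decreasing_by omega

def solve (A : List String) : Int :=
  let n : Int := A.length
  let seat : List Int := (PySem.List.pyRange 0 n 1).foldl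
    (fun s i => if PySem.List.pyGetD A i "" = "x" then s ++ [i] else s) []
  let mid : Int := PySem.Int.floordiv seat.length 2
  let resL := solveLoopL seat mid (mid - 1) 1 0
  solveLoopR seat mid (mid + 1) 1 resL

-- ===== PORT B =====
def solve_alt (A : List String) : Int :=
  let seat : List Int := ((PySem.List.enumerate A 0).filter (fun p => p.2 == "x")).map (·.1)
  let m : Int := seat.length
  (PySem.List.pyRange 0 (m - 1) 1).foldl
    (fun acc j => acc +
      (PySem.List.pyGetD seat (j + 1) 0 - PySem.List.pyGetD seat j 0 - 1) *
        min (j + 1) (m - 1 - j)) 0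

-- ===== PRECONDITION & SPEC =====
def Spec_solve (A : List String) (out : Int) : Prop := out = solve_alt A
instance (A : List String) (out : Int) : Decidable (Spec_solve A out) := by unfold Spec_solve; infer_instance

-- ===== CLAIM (what is proved, stated in full; the proofs are below) =====
def Claim_equal_solve : Prop := ∀ (A : List String), Dom_solve A → Spec_solve A (solve A)

-- ===== LEMMAS AND PROOFS =====

/-- The positions (as Ints, starting at offset `s`) of the `"x"` entries of `A`. -/
def seatAux : List String → Int → List Int
  | [], _ => []
  | a :: as, s => (if a = "x" then [s] else []) ++ seatAux as (s + 1)

theorem seatAux_append (xs : List String) (a : String) :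
    ∀ s : Int, seatAux (xs ++ [a]) s =
      seatAux xs s ++ (if a = "x" then [s + (xs.length : Int)] else []) := by
  induction xs with
  | nil => intro s; simp [seatAux]
  | cons x xs ih =>
      intro s
      simp only [List.cons_append, seatAux, ih (s + 1), List.length_cons]
      split_ifs <;> simp <;> ring_nf

theorem seatB_eq (A : List String) : ∀ s : Int,
    ((PySem.List.enumerate A s).filter (fun p => p.2 == "x")).map (·.1) = seatAux A s := by
  induction A with
  | nil => intro s; simp [seatAux, PySem.List.enumerate_nil]
  | cons a as ih =>
      intro s
      rw [PySem.List.enumerate_cons]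
      by_cases h : a = "x" <;> simp [seatAux, h, ih (s + 1)]

theorem seatA_eq (A : List String) :
    (PySem.List.pyRange 0 (A.length : Int) 1).foldl
      (fun s i => if PySem.List.pyGetD A i "" = "x" then s ++ [i] else s) [] = seatAux A 0 := by
  rw [PySem.List.foldl_append_ite_eq_filter, List.nil_append]
  induction A using List.reverseRecOn with
  | nil => simp [seatAux, PySem.List.pyRange_one_eq_nil]
  | append_singleton xs a ih =>
      have hlen : ((xs ++ [a]).length : Int) = (xs.length : Int) + 1 := by simp
      rw [hlen, PySem.List.pyRange_one_succ_right (by positivity), List.filter_append,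
        seatAux_append]
      congr 1
      · rw [← ih]
        apply List.filter_congr
        intro i hi
        obtain ⟨hi0, hi1⟩ := (PySem.List.mem_pyRange_one).1 hi
        have h1 : PySem.List.pyGetD (xs ++ [a]) i "" = PySem.List.pyGetD xs i "" := by
          rw [PySem.List.pyGetD_eq_getElem (xs ++ [a]) "" (by omega) (by simp; omega),
            PySem.List.pyGetD_eq_getElem xs "" (by omega) (by omega)]
          exact List.getElem_append_left (by omega)
        rw [h1]
      · have h2 : PySem.List.pyGetD (xs ++ [a]) ((xs.length : Int)) "" = a := by
          rw [PySem.List.pyGetD_eq_getElem (xs ++ [a]) "" (by positivity) (by simp)]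
          simp
        simp only [List.filter_singleton, h2]
        split_ifs <;> simp_all

theorem loopL_eval (seat : List Int) (mid : Int) :
    ∀ (c : Nat) (k res : Int),
      solveLoopL seat mid ((c : Int) - 1) k res =
        res + ∑ t ∈ Finset.range c,
          (PySem.List.pyGetD seat mid 0 - seat.getD (c - 1 - t) 0 - (k + t)) := by
  intro c
  induction c with
  | zero => intro k res; rw [solveLoopL]; norm_num
  | succ c ih =>
      intro k res
      rw [solveLoopL]
      have hg : ((c + 1 : Nat) : Int) - 1 > -1 := by push_cast; omega
      rw [if_pos hg]
      rw [show ((c + 1 : Nat) : Int) - 1 = ((c : Nat) : Int) from by push_cast; ring]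
      rw [ih (k + 1), PySem.List.pyGetD_natCast]
      rw [Finset.sum_range_succ']
      have hcongr : ∀ t ∈ Finset.range c,
          (PySem.List.pyGetD seat mid 0 - seat.getD (c - 1 - t) 0 - (k + 1 + t)) =
          (PySem.List.pyGetD seat mid 0 - seat.getD (c + 1 - 1 - (t + 1)) 0 - (k + ((t : Int) + 1))) := by
        intro t ht
        have he : c + 1 - 1 - (t + 1) = c - 1 - t := by omega
        rw [he]; ring
      rw [Finset.sum_congr rfl hcongr]
      simp only [Nat.add_sub_cancel, Nat.sub_zero, Nat.cast_zero, add_zero]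
      push_cast
      ring

theorem loopR_eval (seat : List Int) (mid : Int) :
    ∀ (c : Nat), c ≤ seat.length → ∀ (k res : Int),
      solveLoopR seat mid ((seat.length : Int) - c) k res =
        res + ∑ t ∈ Finset.range c,
          (seat.getD (seat.length - c + t) 0 - PySem.List.pyGetD seat mid 0 - (k + t)) := by
  intro c
  induction c with
  | zero => intro _ k res; rw [solveLoopR]; norm_num
  | succ c ih =>
      intro hc k res
      rw [solveLoopR]
      have hg : (seat.length : Int) - ((c + 1 : Nat) : Int) < (seat.length : Int) := by
        push_cast; omega
      rw [if_pos hg]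
      have h1 : (seat.length : Int) - ((c + 1 : Nat) : Int) =
          ((seat.length - (c + 1) : Nat) : Int) := by push_cast; omega
      rw [h1]
      rw [show ((seat.length - (c + 1) : Nat) : Int) + 1 = (seat.length : Int) - (c : Nat) by omega]
      rw [ih (by omega) (k + 1), PySem.List.pyGetD_natCast]
      rw [Finset.sum_range_succ']
      have : ∀ t ∈ Finset.range c,
          (seat.getD (seat.length - c + t) 0 - PySem.List.pyGetD seat mid 0 - (k + 1 + t)) =
          (seat.getD (seat.length - (c + 1) + (t + 1)) 0 - PySem.List.pyGetD seat mid 0 - (k + ((t : Int) + 1))) := by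
        intro t ht
        have : seat.length - (c + 1) + (t + 1) = seat.length - c + t := by omega
        rw [this]; ring
      rw [Finset.sum_congr rfl this]
      push_cast
      ring_nf

theorem sum_map_range (h : Nat → Int) (n : Nat) :
    ((List.range n).map h).sum = ∑ j ∈ Finset.range n, h j := by
  induction n with
  | zero => simp
  | succ n ih => rw [List.range_succ, Finset.sum_range_succ]; simp [ih]

theorem sum_range_add_int (f : Nat → Int) (a b : Nat) :
    ∑ i ∈ Finset.range (a + b), f i =
      ∑ i ∈ Finset.range a, f i + ∑ i ∈ Finset.range b, f (a + i) := by
  induction b with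
  | zero => simp
  | succ b ih => rw [← Nat.add_assoc, Finset.sum_range_succ, Finset.sum_range_succ, ih]; ring

/-- A's left walk equals the gap sum with weights j+1. -/
theorem leftSum (D : Nat → Int) :
    ∀ k : Nat, (∑ t ∈ Finset.range k, (D k - D (k - 1 - t) - (1 + (t : Int)))) =
      ∑ j ∈ Finset.range k, ((j : Int) + 1) * (D (j + 1) - D j - 1) := by
  intro k
  induction k with
  | zero => simp
  | succ k ih =>
      rw [Finset.sum_range_succ' (fun t => D (k + 1) - D (k + 1 - 1 - t) - (1 + (t : Int)))]
      have h0 : D (k + 1) - D (k + 1 - 1 - 0) - (1 + ((0 : Nat) : Int)) =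
          D (k + 1) - D k - 1 := by norm_num
      have hstep : ∀ t ∈ Finset.range k,
          (D (k + 1) - D (k + 1 - 1 - (t + 1)) - (1 + ((t + 1 : Nat) : Int))) =
          (D k - D (k - 1 - t) - (1 + (t : Int))) + (D (k + 1) - D k - 1) := by
        intro t ht
        have he : k + 1 - 1 - (t + 1) = k - 1 - t := by omega
        rw [he]; push_cast; ring
      rw [Finset.sum_congr rfl hstep, Finset.sum_add_distrib, ih, Finset.sum_const, h0]
      rw [Finset.sum_range_succ]
      simp only [Finset.card_range, nsmul_eq_mul]
      ring

/-- Telescoping: consecutive gaps from s sum to a distance. -/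
theorem teleSum (D : Nat → Int) (s : Nat) :
    ∀ c : Nat, (∑ t ∈ Finset.range c, (D (s + t + 1) - D (s + t) - 1)) =
      D (s + c) - D s - c := by
  intro c
  induction c with
  | zero => simp
  | succ c ih =>
      rw [Finset.sum_range_succ, ih, show s + (c + 1) = s + c + 1 from by omega]
      push_cast; ring

/-- A's right walk equals the gap sum with weights c-t. -/
theorem rightSum (D : Nat → Int) (s : Nat) :
    ∀ c : Nat, (∑ t ∈ Finset.range c, (D (s + 1 + t) - D s - (1 + (t : Int)))) =
      ∑ t ∈ Finset.range c, ((c : Int) - t) * (D (s + t + 1) - D (s + t) - 1) := by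
  intro c
  induction c with
  | zero => simp
  | succ c ih =>
      rw [Finset.sum_range_succ, ih]
      have hsplit : ∀ t ∈ Finset.range (c + 1),
          (((c + 1 : Nat) : Int) - t) * (D (s + t + 1) - D (s + t) - 1) =
          ((c : Int) - t) * (D (s + t + 1) - D (s + t) - 1) + (D (s + t + 1) - D (s + t) - 1) := by
        intro t ht; push_cast; ring
      rw [Finset.sum_congr rfl hsplit, Finset.sum_add_distrib, teleSum D s (c + 1)]
      rw [Finset.sum_range_succ ((fun t => ((c : Int) - t) * (D (s + t + 1) - D (s + t) - 1)))]
      rw [show s + 1 + c = s + (c + 1) from by omega]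
      push_cast
      ring

-- ===== VERDICT (by name: the statement is the Claim_ definition above) =====
theorem solve_spec : Claim_equal_solve := by
  unfold Claim_equal_solve
  intro A _
  show Spec_solve A (solve A)
  unfold Spec_solve solve solve_alt
  simp only [seatA_eq A, seatB_eq A 0]
  set L : List Int := seatAux A 0 with hLdef
  set m := L.length with hm
  have hmid : PySem.Int.floordiv ((m : Nat) : Int) 2 = ((m / 2 : Nat) : Int) := by
    exact_mod_cast PySem.Int.floordiv_natCast m 2
  set midN := m / 2 with hmidN
  set D : Nat → Int := fun j => L.getD j 0 with hD
  -- B's side: fold → sum over range (m-1)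
  have hgetD : ∀ j : Nat, PySem.List.pyGetD L ((j : Int) + 1) 0 = L.getD (j + 1) 0 := by
    intro j
    rw [show ((j : Int) + 1) = ((j + 1 : Nat) : Int) from by push_cast; ring,
      PySem.List.pyGetD_natCast]
  have hB : (PySem.List.pyRange 0 ((m : Int) - 1) 1).foldl
      (fun acc j => acc +
        (PySem.List.pyGetD L (j + 1) 0 - PySem.List.pyGetD L j 0 - 1) *
          min (j + 1) ((m : Int) - 1 - j)) 0 =
      ∑ j ∈ Finset.range (m - 1),
        (D (j + 1) - D j - 1) * min ((j : Int) + 1) ((m : Int) - 1 - (j : Int)) := by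
    rw [PySem.List.foldl_add, PySem.List.pyRange_one, List.map_map, zero_add, sum_map_range]
    have hlen : (((m : Int) - 1) - 0).toNat = m - 1 := by omega
    rw [hlen]
    apply Finset.sum_congr rfl
    intro j hj
    simp only [Function.comp, zero_add, hgetD j, PySem.List.pyGetD_natCast, hD]
  rw [hB]
  by_cases hm0 : m = 0
  · -- empty seat list: both sides are 0
    rw [hmid]
    rw [show ((midN : Nat) : Int) - 1 = ((0 : Nat) : Int) - 1 from by simp [hmidN, hm0]]
    rw [show ((0 : Nat) : Int) - 1 = ((0 : Nat) : Int) - 1 from rfl]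
    rw [loopL_eval L ((midN : Nat) : Int) 0 1 0]
    rw [solveLoopR]
    rw [if_neg (by simp [← hm, hm0, hmidN])]
    simp [hm0]
  · have hmpos : 0 < m := Nat.pos_of_ne_zero hm0
    have hmidlt : midN < m := Nat.div_lt_self hmpos one_lt_two
    set c := m - midN - 1 with hc
    -- A's side
    rw [hmid]
    rw [loopL_eval L ((midN : Nat) : Int) midN 1 0]
    rw [show ((midN : Nat) : Int) + 1 = (m : Int) - ((c : Nat) : Int) from by omega]
    rw [loopR_eval L ((midN : Nat) : Int) c (by omega) 1]
    simp only [PySem.List.pyGetD_natCast, zero_add]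
    have hLe : (∑ t ∈ Finset.range midN, (D midN - D (midN - 1 - t) - (1 + (t : Int)))) =
        ∑ j ∈ Finset.range midN, ((j : Int) + 1) * (D (j + 1) - D j - 1) := leftSum D midN
    have hRe : (∑ t ∈ Finset.range c, (D (m - c + t) - D midN - (1 + (t : Int)))) =
        ∑ t ∈ Finset.range c, ((c : Int) - t) * (D (midN + t + 1) - D (midN + t) - 1) := by
      have hre : ∀ t ∈ Finset.range c,
          (D (m - c + t) - D midN - (1 + (t : Int))) =
          (D (midN + 1 + t) - D midN - (1 + (t : Int))) := by
        intro t ht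
        rw [show m - c + t = midN + 1 + t from by omega]
      rw [Finset.sum_congr rfl hre]
      exact rightSum D midN c
    rw [hLe, hRe]
    -- split B's sum at midN
    rw [show m - 1 = midN + c from by omega, sum_range_add_int]
    have hBL : (∑ j ∈ Finset.range midN,
        (D (j + 1) - D j - 1) * min ((j : Int) + 1) ((m : Int) - 1 - (j : Int))) =
        ∑ j ∈ Finset.range midN, ((j : Int) + 1) * (D (j + 1) - D j - 1) := by
      apply Finset.sum_congr rfl
      intro j hj
      have hjlt : j < midN := Finset.mem_range.1 hj
      rw [min_eq_left (by omega)]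
      ring
    have hBR : (∑ u ∈ Finset.range c,
        (D (midN + u + 1) - D (midN + u) - 1) *
          min (((midN + u : Nat) : Int) + 1) ((m : Int) - 1 - ((midN + u : Nat) : Int))) =
        ∑ u ∈ Finset.range c, ((c : Int) - u) * (D (midN + u + 1) - D (midN + u) - 1) := by
      apply Finset.sum_congr rfl
      intro u hu
      have hult : u < c := Finset.mem_range.1 hu
      rw [min_eq_right (by omega), show (m : Int) - 1 - ((midN + u : Nat) : Int) =
        ((c : Int) - u) from by omega]
      ring
    rw [hBL, hBR]
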